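-- pv_equiv track=rewrite | github.com/ssoulistic/AlgorithmAttack | 백준/Gold/2448. 별 찍기 － 11/별 찍기 － 11.py | star
-- ===== SOURCE A (Python) =====
-- def star(n):
--     if n==3:
--         return ["  *  "," * * ","*****"]
--     next=[]
--     next2=[]
--     for line in star(n//2):
--         next.append((len(line)//2+1)*" "+line+(len(line)//2+1)*" ")
--         next2.append(line+" "+line)
--     return next+next2
-- ===== SOURCE B (Python) =====
-- def star(n):
--     # Normalise: repeatedly halve n down to the base size 3 (as A's recursion does),
--     # doubling the picture size we will draw.
--     m = n
--     size = 3
--     while m > 3: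
--         m //= 2
--         size *= 2
--     if m != 3:
--         # A never returns on such n (it recurses forever); signal instead.
--         raise ValueError("n must halve down to 3")
--
--     base = ["  *  ", " * * ", "*****"]
--
--     # Build each output row independently, top-down by the fractal structure.
--     def row(s, r):
--         if s == 3:
--             return base[r]
--         h = s // 2
--         if r < h:
--             pad = " " * h
--             return pad + row(h, r) + pad
--         t = row(h, r - h)
--         return t + " " + t
--
--     return [row(size, r) for r in range(size)]
-- ===== Notes on version B (the rewrite author's own statement) =====
-- stated objective: alternative
-- what changed: Replaces A's whole-picture recursion (pad and duplicate every line of the half-size picture) with a size-normalisation loop followed by an independent per-row recursive construction of each output line.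
-- outside the precondition, e.g. on star(2): A raises RecursionError, B raises ValueError
import Mathlib
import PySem

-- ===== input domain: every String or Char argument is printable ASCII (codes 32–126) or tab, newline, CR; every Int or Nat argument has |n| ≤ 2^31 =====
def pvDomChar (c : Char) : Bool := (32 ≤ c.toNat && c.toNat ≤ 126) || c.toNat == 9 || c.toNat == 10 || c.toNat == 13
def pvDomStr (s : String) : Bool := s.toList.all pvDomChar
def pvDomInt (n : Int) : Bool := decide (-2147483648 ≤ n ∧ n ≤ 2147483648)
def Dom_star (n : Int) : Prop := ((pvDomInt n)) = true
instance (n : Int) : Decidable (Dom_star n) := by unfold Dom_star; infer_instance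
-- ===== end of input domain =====

-- B replaces A's whole-picture recursion (pad/duplicate every line of the half-size picture)
-- by a size normalisation loop followed by an independent per-row recursive construction
-- (objective: alternative decomposition, not claimed faster).

-- Python's k*" " (a negative k yields ""; List.replicate with .toNat is exact there)
def pvSpaces (k : Int) : String := String.ofList (List.replicate k.toNat ' ')

-- ===== PORT A =====
-- fuel bounds the recursion depth only; on every input of Pre_star ∩ Dom_star the recursion
-- depth is at most 32 < 64, so the fuel is never exhausted there (proved below)
def starFuelA : Nat → Int → List String
  | 0, _ => []
  | fuel+1, n =>
    if n = 3 then ["  *  ", " * * ", "*****"]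
    else
      -- for line in star(n//2): next.append(pad+line+pad); next2.append(line+" "+line)
      let p := (starFuelA fuel (PySem.Int.floordiv n 2)).foldl
        (fun (acc : List String × List String) line =>
          (acc.1 ++ [pvSpaces (PySem.Int.floordiv (PySem.Str.len line) 2 + 1) ++ line ++
                     pvSpaces (PySem.Int.floordiv (PySem.Str.len line) 2 + 1)],
           acc.2 ++ [line ++ " " ++ line]))
        ([], [])
      p.1 ++ p.2

def star (n : Int) : List String := starFuelA 64 n

-- ===== PORT B =====
-- the while-loop of Source B: while m > 3: m //= 2; size *= 2
def starNormB : Nat → Int × Int → Int × Int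
  | 0, p => p
  | fuel+1, (m, size) =>
    if m > 3 then starNormB fuel (PySem.Int.floordiv m 2, size * 2) else (m, size)

-- Source B's row(s, r); fuel again only bounds the depth (64 suffices on Pre_star ∩ Dom_star)
def starRowB : Nat → Int → Int → String
  | 0, _, _ => ""
  | fuel+1, s, r =>
    if s = 3 then (PySem.List.pyGet? ["  *  ", " * * ", "*****"] r).getD ""
    else
      let h := PySem.Int.floordiv s 2
      if r < h then
        let pad := pvSpaces h
        pad ++ starRowB fuel h r ++ pad
      else
        let t := starRowB fuel h (r - h)
        t ++ " " ++ t

def star_alt (n : Int) : List String :=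
  let p := starNormB 64 (n, 3)
  if p.1 = 3 then (PySem.List.pyRange 0 p.2 1).map (fun r => starRowB 64 p.2 r)
  else []  -- Source B raises ValueError here and A never returns (it recurses forever); outside Pre_star

-- ===== PRECONDITION & SPEC =====
-- exactly the inputs on which A returns: halving n reaches 3, i.e. n = 3·2^k up to rounding
-- (3·2^k ≤ n < 4·2^k); on every other n A recurses forever and raises RecursionError.
-- The bound k ≤ log2 n is not a cap: 3·2^k ≤ n already forces 2^k ≤ n, i.e. k ≤ log2 n.
def Pre_star (n : Int) : Prop := ∃ k : Nat, k ≤ Nat.log2 n.toNat ∧ 3 * 2 ^ k ≤ n ∧ n < 4 * 2 ^ k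
instance (n : Int) : Decidable (Pre_star n) := by unfold Pre_star; infer_instance
def pvWitness_star : Int := 6
def Spec_star (n : Int) (out : List String) : Prop := out = star_alt n
instance (n : Int) (out : List String) : Decidable (Spec_star n out) := by unfold Spec_star; infer_instance

-- ===== CLAIM (what is proved, stated in full; the proofs are below) =====
def Claim_equal_star : Prop := ∀ (n : Int), Dom_star n → Pre_star n → Spec_star n (star n)

-- ===== LEMMAS AND PROOFS =====

-- the canonical picture at halving depth k
def pvPics : Nat → List String
  | 0 => ["  *  ", " * * ", "*****"]
  | k+1 =>
    (pvPics k).map (fun l => pvSpaces (3 * 2 ^ k) ++ l ++ pvSpaces (3 * 2 ^ k)) ++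
    (pvPics k).map (fun l => l ++ " " ++ l)

theorem pvLen_spaces (m : Int) (h : 0 ≤ m) : PySem.Str.len (pvSpaces m) = m := by
  simp [pvSpaces, PySem.Str.len_eq]
  omega

theorem pvLen_pics : ∀ (k : Nat), ∀ l ∈ pvPics k, PySem.Str.len l = 2 * (3 * 2 ^ k) - 1 := by
  intro k
  induction k with
  | zero => intro l hl; simp [pvPics] at hl; rcases hl with rfl | rfl | rfl <;> decide
  | succ k ih =>
    have hp : (0:Int) < 2 ^ k := by positivity
    intro l hl
    simp only [pvPics, List.mem_append, List.mem_map] at hl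
    have h1 : PySem.Str.len " " = 1 := by decide
    have h2 : PySem.Str.len (pvSpaces (3 * 2 ^ k)) = 3 * 2 ^ k :=
      pvLen_spaces (3 * 2 ^ k) (by positivity)
    rcases hl with ⟨x, hx, rfl⟩ | ⟨x, hx, rfl⟩ <;>
      rw [PySem.Str.len_append, PySem.Str.len_append, ih x hx, pow_succ] <;> omega

theorem pvA_eq_pics : ∀ (k : Nat) (fuel : Nat) (n : Int), k < fuel →
    3 * 2 ^ k ≤ n → n < 4 * 2 ^ k → starFuelA fuel n = pvPics k := by
  intro k
  induction k with
  | zero =>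
    intro fuel n hf h1 h2
    obtain ⟨f, rfl⟩ : ∃ f, fuel = f + 1 := ⟨fuel - 1, by omega⟩
    have hn : n = 3 := by simp at h1 h2; omega
    subst hn
    simp [starFuelA, pvPics]
  | succ k ih =>
    intro fuel n hf h1 h2
    obtain ⟨f, rfl⟩ : ∃ f, fuel = f + 1 := ⟨fuel - 1, by omega⟩
    have hp : (0:Int) < 2 ^ k := by positivity
    rw [pow_succ] at h1 h2
    have hne : ¬ (n = 3) := by omega
    have hdiv : PySem.Int.floordiv n 2 = n / 2 :=
      PySem.Int.floordiv_eq_ediv_of_pos (by norm_num)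
    have hrec : starFuelA f (PySem.Int.floordiv n 2) = pvPics k := by
      rw [hdiv]; exact ih f (n / 2) (by omega) (by omega) (by omega)
    simp only [starFuelA, if_neg hne, hrec]
    rw [PySem.List.foldl_prod_mk
      (f := fun a line => a ++ [pvSpaces (PySem.Int.floordiv (PySem.Str.len line) 2 + 1) ++ line ++
                     pvSpaces (PySem.Int.floordiv (PySem.Str.len line) 2 + 1)])
      (g := fun a line => a ++ [line ++ " " ++ line])]
    simp only [PySem.List.foldl_append_singleton_eq_map, List.nil_append]
    have hpad : ∀ l ∈ pvPics k,
        pvSpaces (PySem.Int.floordiv (PySem.Str.len l) 2 + 1) ++ l ++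
        pvSpaces (PySem.Int.floordiv (PySem.Str.len l) 2 + 1) =
        pvSpaces (3 * 2 ^ k) ++ l ++ pvSpaces (3 * 2 ^ k) := by
      intro l hl
      rw [pvLen_pics k l hl, PySem.Int.floordiv_eq_ediv_of_pos (by norm_num)]
      have : ((2 * (3 * 2 ^ k) - 1 : Int)) / 2 + 1 = 3 * 2 ^ k := by omega
      rw [this]
    rw [List.map_congr_left hpad]
    simp [pvPics]

theorem pvNorm_eq : ∀ (k : Nat) (fuel : Nat) (n size : Int), k < fuel →
    3 * 2 ^ k ≤ n → n < 4 * 2 ^ k → starNormB fuel (n, size) = (3, size * 2 ^ k) := by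
  intro k
  induction k with
  | zero =>
    intro fuel n size hf h1 h2
    obtain ⟨f, rfl⟩ : ∃ f, fuel = f + 1 := ⟨fuel - 1, by omega⟩
    have hn : n = 3 := by simp at h1 h2; omega
    subst hn
    simp [starNormB]
  | succ k ih =>
    intro fuel n size hf h1 h2
    obtain ⟨f, rfl⟩ : ∃ f, fuel = f + 1 := ⟨fuel - 1, by omega⟩
    have hp : (0:Int) < 2 ^ k := by positivity
    rw [pow_succ] at h1 h2
    have hgt : n > 3 := by omega
    have hdiv : PySem.Int.floordiv n 2 = n / 2 :=
      PySem.Int.floordiv_eq_ediv_of_pos (by norm_num)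
    simp only [starNormB, if_pos hgt, hdiv]
    rw [ih f (n / 2) (size * 2) (by omega) (by omega) (by omega), pow_succ]
    ring_nf

theorem pvB_rows_eq_pics : ∀ (k : Nat) (fuel : Nat), k < fuel →
    (PySem.List.pyRange 0 (3 * 2 ^ k) 1).map (starRowB fuel (3 * 2 ^ k)) = pvPics k := by
  intro k
  induction k with
  | zero =>
    intro fuel hf
    obtain ⟨f, rfl⟩ : ∃ f, fuel = f + 1 := ⟨fuel - 1, by omega⟩
    norm_num
    rw [show PySem.List.pyRange 0 3 1 = [0, 1, 2] by decide]
    simp [starRowB, PySem.List.pyGet?, PySem.List.pyIdx?, pvPics]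
  | succ k ih =>
    intro fuel hf
    obtain ⟨f, rfl⟩ : ∃ f, fuel = f + 1 := ⟨fuel - 1, by omega⟩
    have hp : (0:Int) < 2 ^ k := by positivity
    have hm : (3 : Int) * 2 ^ (k + 1) = 2 * (3 * 2 ^ k) := by rw [pow_succ]; ring
    rw [hm, PySem.List.pyRange_one_append 0 (3 * 2 ^ k) (2 * (3 * 2 ^ k)) (by omega) (by omega),
        List.map_append]
    have hstep : ∀ r : Int, starRowB (f + 1) (2 * (3 * 2 ^ k)) r =
        if r < 3 * 2 ^ k then
          pvSpaces (3 * 2 ^ k) ++ starRowB f (3 * 2 ^ k) r ++ pvSpaces (3 * 2 ^ k)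
        else starRowB f (3 * 2 ^ k) (r - 3 * 2 ^ k) ++ " " ++
             starRowB f (3 * 2 ^ k) (r - 3 * 2 ^ k) := by
      intro r
      have hne : ¬ ((2 : Int) * (3 * 2 ^ k) = 3) := by omega
      have hdiv : PySem.Int.floordiv (2 * (3 * 2 ^ k)) 2 = 3 * 2 ^ k := by
        rw [PySem.Int.floordiv_eq_ediv_of_pos (by norm_num)]; omega
      simp only [starRowB, if_neg hne, hdiv]
    have hfst : (PySem.List.pyRange 0 (3 * 2 ^ k) 1).map (starRowB (f + 1) (2 * (3 * 2 ^ k))) =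
        (pvPics k).map (fun l => pvSpaces (3 * 2 ^ k) ++ l ++ pvSpaces (3 * 2 ^ k)) := by
      rw [List.map_congr_left (g := fun r =>
            pvSpaces (3 * 2 ^ k) ++ starRowB f (3 * 2 ^ k) r ++ pvSpaces (3 * 2 ^ k))
          (fun r hr => by
            rw [hstep r, if_pos (PySem.List.mem_pyRange_one.mp hr).2])]
      rw [← ih f (by omega)]
      simp [List.map_map, Function.comp_def]
    have hsnd : (PySem.List.pyRange (3 * 2 ^ k) (2 * (3 * 2 ^ k)) 1).map
          (starRowB (f + 1) (2 * (3 * 2 ^ k))) =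
        (pvPics k).map (fun l => l ++ " " ++ l) := by
      rw [List.map_congr_left (g := fun r =>
            starRowB f (3 * 2 ^ k) (r - 3 * 2 ^ k) ++ " " ++ starRowB f (3 * 2 ^ k) (r - 3 * 2 ^ k))
          (fun r hr => by
            rw [hstep r, if_neg (by have := (PySem.List.mem_pyRange_one.mp hr).1; omega)])]
      rw [PySem.List.pyRange_one (3 * 2 ^ k) (2 * (3 * 2 ^ k)),
          show ((2 * (3 * 2 ^ k) - 3 * 2 ^ k : Int)) = 3 * 2 ^ k by ring]
      rw [← ih f (by omega), PySem.List.pyRange_one 0 (3 * 2 ^ k)]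
      simp [List.map_map, Function.comp_def]
    rw [hfst, hsnd]
    rfl

-- inside Dom_star the halving depth is below the fuel: 3·2^k ≤ n ≤ 2^31 forces k ≤ 29
theorem pvDepth_lt_fuel (n : Int) (k : Nat) (hD : Dom_star n) (h1 : 3 * 2 ^ k ≤ n) : k < 64 := by
  by_contra h
  push Not at h
  have h2 : (2 : Int) ^ 64 ≤ 2 ^ k := pow_le_pow_right₀ (by norm_num) h
  have h3 : n ≤ 2147483648 := by
    simp [Dom_star, pvDomInt] at hD; omega
  have h4 : (2 : Int) ^ 64 = 18446744073709551616 := by norm_num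
  omega

-- ===== VERDICT (by name: the statement is the Claim_ definition above) =====
theorem star_spec : Claim_equal_star := by
  intro n hD ⟨k, _, h1, h2⟩
  have hk : k < 64 := pvDepth_lt_fuel n k hD h1
  unfold Spec_star _root_.star star_alt
  rw [pvNorm_eq k 64 n 3 hk h1 h2]
  rw [pvA_eq_pics k 64 n hk h1 h2]
  exact (pvB_rows_eq_pics k 64 hk).symm
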